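-- pv_equiv track=rewrite | github.com/xocelyk/post-hoc-reasoning | src/main.py | create_test_subsets
-- ===== SOURCE A (Python) =====
-- def create_test_subsets(test_results):
--     yes_test_data = [
--         result
--         for result in test_results
--         if result["pred_answer"] == "yes" and result["correct_answer"] == "yes"
--     ]
--     no_test_data = [
--         result
--         for result in test_results
--         if result["pred_answer"] == "no" and result["correct_answer"] == "no"
--     ]
--     return yes_test_data, no_test_data
-- ===== SOURCE B (Python) =====
-- def create_test_subsets(test_results):
--     # Group results into buckets keyed by (pred_answer, correct_answer) in one
--     # pass, then just read off the ("yes","yes") and ("no","no") buckets.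
--     buckets = {}
--     for result in test_results:
--         key = (result["pred_answer"], result.get("correct_answer"))
--         buckets.setdefault(key, []).append(result)
--     return buckets.get(("yes", "yes"), []), buckets.get(("no", "no"), [])
-- ===== Notes on version B (the rewrite author's own statement) =====
-- stated objective: alternative
-- what changed: A makes two independent filtering passes with hard-coded predicates; B builds, in one pass, a dictionary of buckets grouped by the (pred_answer, correct_answer) key pair and then simply looks up the ('yes','yes') and ('no','no') buckets.
import Mathlib
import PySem

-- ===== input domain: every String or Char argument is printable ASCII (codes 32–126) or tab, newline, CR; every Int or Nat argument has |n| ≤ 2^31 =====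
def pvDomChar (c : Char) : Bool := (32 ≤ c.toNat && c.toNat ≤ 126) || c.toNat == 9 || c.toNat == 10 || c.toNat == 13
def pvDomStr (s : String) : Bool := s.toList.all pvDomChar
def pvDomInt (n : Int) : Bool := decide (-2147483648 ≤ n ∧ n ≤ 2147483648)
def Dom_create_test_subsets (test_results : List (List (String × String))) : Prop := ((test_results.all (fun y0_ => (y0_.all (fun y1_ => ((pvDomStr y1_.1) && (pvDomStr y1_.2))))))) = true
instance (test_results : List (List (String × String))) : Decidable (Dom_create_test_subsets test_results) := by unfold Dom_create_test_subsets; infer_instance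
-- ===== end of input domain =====

-- B replaces A's two hard-coded filtering passes by one grouping pass into a dictionary of
-- (pred_answer, correct_answer)-keyed buckets followed by two bucket lookups (alternative, same cost).

-- ===== PORT A =====
-- dict lookup result["key"]: first match in the association list (KeyError, i.e. none, if absent — excluded by Pre_)
def pvIsYes (r : List (String × String)) : Bool :=
  (r.lookup "pred_answer" == some "yes") && (r.lookup "correct_answer" == some "yes")
def pvIsNo (r : List (String × String)) : Bool :=
  (r.lookup "pred_answer" == some "no") && (r.lookup "correct_answer" == some "no")

def create_test_subsets (test_results : List (List (String × String))) : (List (List (String × String))) × (List (List (String × String))) :=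
  let yes_test_data := test_results.filter (fun result => pvIsYes result)
  let no_test_data := test_results.filter (fun result => pvIsNo result)
  (yes_test_data, no_test_data)

-- ===== PORT B =====
-- key = (result["pred_answer"], result.get("correct_answer")); the getD "" stands for the
-- KeyError Python raises on a missing "pred_answer" (excluded by Pre_)
def pvKey (r : List (String × String)) : String × Option String :=
  ((r.lookup "pred_answer").getD "", r.lookup "correct_answer")

-- buckets.setdefault(key, []).append(result) = modify key [] (· ++ [result])
def create_test_subsets_alt (test_results : List (List (String × String))) : (List (List (String × String))) × (List (List (String × String))) :=
  let buckets := test_results.foldl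
    (fun d result => d.modify (pvKey result) [] (· ++ [result]))
    PySem.Dict.empty
  (buckets.getD ("yes", some "yes") [], buckets.getD ("no", some "no") [])

-- ===== PRECONDITION & SPEC =====
-- Pre_ excludes inputs on which the Python A raises KeyError: a result missing the
-- "pred_answer" key, or one whose pred_answer is "yes"/"no" but which lacks "correct_answer".
def Pre_create_test_subsets (test_results : List (List (String × String))) : Prop :=
  (test_results.all (fun r =>
    (r.lookup "pred_answer").isSome &&
    (!((r.lookup "pred_answer" == some "yes") || (r.lookup "pred_answer" == some "no")) ||
      (r.lookup "correct_answer").isSome))) = true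
instance (test_results : List (List (String × String))) : Decidable (Pre_create_test_subsets test_results) := by unfold Pre_create_test_subsets; infer_instance
def pvWitness_create_test_subsets : (List (List (String × String))) :=
  [[("pred_answer", "yes"), ("correct_answer", "yes")], [("pred_answer", "no"), ("correct_answer", "no")]]

def Spec_create_test_subsets (test_results : List (List (String × String))) (out : (List (List (String × String))) × (List (List (String × String)))) : Prop := out = create_test_subsets_alt test_results
instance (test_results : List (List (String × String))) (out : (List (List (String × String))) × (List (List (String × String)))) : Decidable (Spec_create_test_subsets test_results out) := by unfold Spec_create_test_subsets; infer_instance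

-- ===== CLAIM (what is proved, stated in full; the proofs are below) =====
def Claim_equal_create_test_subsets : Prop := ∀ (test_results : List (List (String × String))), Dom_create_test_subsets test_results → Pre_create_test_subsets test_results → Spec_create_test_subsets test_results (create_test_subsets test_results)

-- ===== LEMMAS AND PROOFS =====

-- the grouping loop characterised: bucket c holds exactly the results keyed c, in order
theorem pvBuckets_getD (l : List (List (String × String))) (c : String × Option String) :
    (l.foldl (fun d result => d.modify (pvKey result) [] (· ++ [result])) PySem.Dict.empty).getD c []
      = l.filter (fun r => pvKey r == c) := by
  have h : l.foldl (fun d result => d.modify (pvKey result) [] (· ++ [result])) PySem.Dict.empty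
      = (l.map (fun r => (pvKey r, r))).foldl (fun d p => d.modify p.1 [] (· ++ [p.2]))
          PySem.Dict.empty := by
    rw [List.foldl_map]
  rw [h, PySem.Dict.getD_foldl_modify_append]
  simp [List.filter_map, Function.comp_def]

-- matching key ("yes", some "yes") is A's yes-predicate
theorem pvKey_yes (r : List (String × String)) :
    (pvKey r == (("yes" : String), some ("yes" : String))) = pvIsYes r := by
  unfold pvKey pvIsYes
  cases h : r.lookup "pred_answer" <;> rfl

-- matching key ("no", some "no") is A's no-predicate
theorem pvKey_no (r : List (String × String)) :
    (pvKey r == (("no" : String), some ("no" : String))) = pvIsNo r := by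
  unfold pvKey pvIsNo
  cases h : r.lookup "pred_answer" <;> rfl

-- ===== VERDICT (by name: the statement is the Claim_ definition above) =====
theorem create_test_subsets_spec : Claim_equal_create_test_subsets := by
  intro test_results _ _
  unfold Spec_create_test_subsets create_test_subsets create_test_subsets_alt
  simp only [pvBuckets_getD]
  refine Prod.ext ?_ ?_ <;> simp [pvKey_yes, pvKey_no]
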